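-- pv_equiv track=rewrite | github.com/HAHAHAHA123456/MyUtils | LeTou_Blue_StaticFunc.py | direct1_staticLotteryNumber
-- ===== SOURCE A (Python) =====
-- def direct1_staticCounts(dataList, number):
--     idx = 0
--     countsNumber = 0
--     while idx < len(dataList):
--         if number in list(dataList[idx]):
--             countsNumber += 1
--         idx += 1
--     return countsNumber
--
-- def direct1_staticLotteryNumber(dataList):
--     staticVariables = []
--     temp_dict = {}
--     for i in range(1, 13):
--         staticVariables.append(direct1_staticCounts(dataList=dataList, number=i))
--     for idx, values in enumerate(staticVariables, 1):
--         temp_dict[idx] = values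
--     return temp_dict
-- ===== SOURCE B (Python) =====
-- def direct1_staticLotteryNumber(dataList):
--     # single pass over dataList instead of twelve full scans
--     counts = {i: 0 for i in range(1, 13)}
--     for entry in dataList:
--         for i in range(1, 13):
--             if i in entry:
--                 counts[i] += 1
--     return counts
-- ===== Notes on version B (the rewrite author's own statement) =====
-- stated objective: alternative
-- what changed: Replaces A's twelve separate full scans of dataList (one per number) with a single pass that tallies all twelve numbers into a pre-initialised dict per entry.
import Mathlib
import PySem

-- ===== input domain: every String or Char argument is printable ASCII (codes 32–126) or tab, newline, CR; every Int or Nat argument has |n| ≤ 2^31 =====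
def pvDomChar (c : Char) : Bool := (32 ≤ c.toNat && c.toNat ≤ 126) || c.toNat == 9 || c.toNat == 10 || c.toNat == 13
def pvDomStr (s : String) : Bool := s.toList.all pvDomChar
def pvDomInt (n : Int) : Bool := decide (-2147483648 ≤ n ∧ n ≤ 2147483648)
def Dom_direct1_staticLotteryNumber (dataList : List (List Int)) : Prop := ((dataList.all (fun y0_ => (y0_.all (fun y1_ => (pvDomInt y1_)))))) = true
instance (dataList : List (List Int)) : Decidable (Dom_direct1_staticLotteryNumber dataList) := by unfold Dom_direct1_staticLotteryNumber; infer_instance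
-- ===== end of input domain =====

-- B replaces A's twelve separate scans of dataList (one per number) with one single
-- pass tallying all twelve numbers into a pre-initialised dict (alternative traversal).

-- ===== PORT A =====
-- while idx < len(dataList): if number in list(dataList[idx]): countsNumber += 1
def direct1_staticCounts (dataList : List (List Int)) (number : Int) : Int :=
  dataList.foldl (fun countsNumber row => if number ∈ row then countsNumber + 1 else countsNumber) 0

def direct1_staticLotteryNumber (dataList : List (List Int)) : List (Int × Int) :=
  let staticVariables : List Int :=
    (PySem.List.pyRange 1 13 1).foldl (fun acc i => acc ++ [direct1_staticCounts dataList i]) []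
  let temp_dict : PySem.Dict Int Int :=
    (PySem.List.enumerate staticVariables 1).foldl (fun d p => d.insert p.1 p.2) PySem.Dict.empty
  temp_dict.items

-- ===== PORT B =====
def direct1_staticLotteryNumber_alt (dataList : List (List Int)) : List (Int × Int) :=
  let counts0 : PySem.Dict Int Int :=
    (PySem.List.pyRange 1 13 1).foldl (fun d i => d.insert i 0) PySem.Dict.empty
  let counts : PySem.Dict Int Int :=
    dataList.foldl
      (fun d entry =>
        (PySem.List.pyRange 1 13 1).foldl
          (fun d i => if i ∈ entry then d.modify i 0 (· + 1) else d) d)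
      counts0
  counts.items

-- ===== PRECONDITION & SPEC =====
def Spec_direct1_staticLotteryNumber (dataList : List (List Int)) (out : List (Int × Int)) : Prop := out = direct1_staticLotteryNumber_alt dataList
instance (dataList : List (List Int)) (out : List (Int × Int)) : Decidable (Spec_direct1_staticLotteryNumber dataList out) := by unfold Spec_direct1_staticLotteryNumber; infer_instance

-- ===== CLAIM (what is proved, stated in full; the proofs are below) =====
def Claim_equal_direct1_staticLotteryNumber : Prop := ∀ (dataList : List (List Int)), Dom_direct1_staticLotteryNumber dataList → Spec_direct1_staticLotteryNumber dataList (direct1_staticLotteryNumber dataList)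

-- ===== LEMMAS AND PROOFS =====

-- getD on a dict whose items are ks.map (fun i => (i, f i)) reads back f
theorem getD_map_shape (ks : List Int) (f : Int → Int) (k : Int) (hk : k ∈ ks) :
    (PySem.Dict.mk (ks.map fun i => (i, f i))).getD k 0 = f k := by
  induction ks with
  | nil => cases hk
  | cons a ks ih =>
    simp only [List.map_cons]
    by_cases hak : a = k
    · subst hak
      simp [PySem.Dict.getD, PySem.Dict.get?_mk_cons]
    · have hk' : k ∈ ks := by
        rcases List.mem_cons.mp hk with h | h
        · exact absurd h.symm hak
        · exact h
      have := ih hk'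
      simpa [PySem.Dict.getD, PySem.Dict.get?_mk_cons, hak] using this

theorem contains_map_shape (ks : List Int) (f : Int → Int) (k : Int) (hk : k ∈ ks) :
    (PySem.Dict.mk (ks.map fun i => (i, f i))).contains k = true := by
  simp [PySem.Dict.contains_mk, List.any_eq_true]
  exact hk

theorem modify_map_shape (ks : List Int) (f : Int → Int) (k : Int) (hk : k ∈ ks) :
    (PySem.Dict.mk (ks.map fun i => (i, f i))).modify k 0 (· + 1)
      = PySem.Dict.mk (ks.map fun i => (i, if i = k then f i + 1 else f i)) := by
  have hc := contains_map_shape ks f k hk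
  have hget := getD_map_shape ks f k hk
  apply PySem.Dict.ext
  rw [PySem.Dict.modify, hget, PySem.Dict.items_insert_of_contains _ _ hc]
  simp only [List.map_map]
  refine List.map_congr_left ?_
  intro i _
  by_cases hik : i = k
  · subst hik; simp
  · simp [hik]

-- the inner per-entry pass over candidates cs increments exactly the keys present in entry
theorem inner_fold (cs : List Int) (ks : List Int) (entry : List Int) (f : Int → Int)
    (hsub : ∀ c ∈ cs, c ∈ ks) (hndcs : cs.Nodup) :
    cs.foldl (fun d i => if i ∈ entry then d.modify i 0 (· + 1) else d)
        (PySem.Dict.mk (ks.map fun i => (i, f i)))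
      = PySem.Dict.mk (ks.map fun i => (i, if i ∈ cs ∧ i ∈ entry then f i + 1 else f i)) := by
  induction cs generalizing f with
  | nil => simp
  | cons c cs ih =>
    have hc : c ∈ ks := hsub c (List.mem_cons_self ..)
    have hsub' : ∀ x ∈ cs, x ∈ ks := fun x hx => hsub x (List.mem_cons_of_mem _ hx)
    have hcn : c ∉ cs := (List.nodup_cons.mp hndcs).1
    have hnd' : cs.Nodup := (List.nodup_cons.mp hndcs).2
    simp only [List.foldl_cons]
    by_cases hce : c ∈ entry
    · rw [if_pos hce, modify_map_shape ks f c hc,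
        ih (fun i => if i = c then f i + 1 else f i) hsub' hnd']
      congr 1
      refine List.map_congr_left ?_
      intro i _
      by_cases hic : i = c
      · subst hic
        simp [hcn, hce]
      · simp [hic, List.mem_cons]
    · rw [if_neg hce, ih f hsub' hnd']
      congr 1
      refine List.map_congr_left ?_
      intro i _
      by_cases hic : i = c
      · subst hic; simp [hce]
      · simp [List.mem_cons, hic]

-- the whole one-pass loop computes, for each key, A's per-number count
theorem outer_fold (rows : List (List Int)) (f : Int → Int) :
    rows.foldl
        (fun d entry =>
          (PySem.List.pyRange 1 13 1).foldl
            (fun d i => if i ∈ entry then d.modify i 0 (· + 1) else d) d)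
        (PySem.Dict.mk ((PySem.List.pyRange 1 13 1).map fun i => (i, f i)))
      = PySem.Dict.mk ((PySem.List.pyRange 1 13 1).map fun i =>
          (i, rows.foldl (fun c row => if i ∈ row then c + 1 else c) (f i))) := by
  induction rows generalizing f with
  | nil => simp
  | cons row rows ih =>
    simp only [List.foldl_cons]
    rw [inner_fold (PySem.List.pyRange 1 13 1) (PySem.List.pyRange 1 13 1) row f
        (fun c hc => hc) (PySem.List.nodup_pyRange_one 1 13)]
    have hmap : ((PySem.List.pyRange 1 13 1).map fun i =>
          (i, if i ∈ PySem.List.pyRange 1 13 1 ∧ i ∈ row then f i + 1 else f i))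
        = ((PySem.List.pyRange 1 13 1).map fun i =>
          (i, if i ∈ row then f i + 1 else f i)) := by
      refine List.map_congr_left ?_
      intro i hi
      simp [hi]
    rw [hmap, ih (fun i => if i ∈ row then f i + 1 else f i)]

-- A's result is the association list [(i, staticCounts i)] for i = 1..12
theorem A_characterization (dataList : List (List Int)) :
    direct1_staticLotteryNumber dataList
      = (PySem.List.pyRange 1 13 1).map fun i => (i, direct1_staticCounts dataList i) := by
  unfold direct1_staticLotteryNumber
  rw [PySem.List.foldl_append_singleton_eq_map]
  simp only [List.nil_append]
  set xs := (PySem.List.pyRange 1 13 1).map (fun i => direct1_staticCounts dataList i) with hxs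
  rw [PySem.Dict.items_foldl_insert_fresh (PySem.List.enumerate xs 1) Prod.fst Prod.snd
      PySem.Dict.empty (fun a _ => rfl)
      (by rw [PySem.List.map_fst_enumerate]; exact PySem.List.nodup_pyRange_one 1 _)]
  have hitems : PySem.Dict.empty.items = ([] : List (Int × Int)) := rfl
  rw [hitems, List.nil_append]
  -- enumerate (K.map g) 1 = K.map (fun i => (i, g i)) for K = pyRange 1 13 1, concretely
  have hK : PySem.List.pyRange 1 13 1 = [1,2,3,4,5,6,7,8,9,10,11,12] := by decide
  rw [hxs, hK]
  simp [PySem.List.enumerate]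

-- B's result is the same association list
theorem B_characterization (dataList : List (List Int)) :
    direct1_staticLotteryNumber_alt dataList
      = (PySem.List.pyRange 1 13 1).map fun i => (i, direct1_staticCounts dataList i) := by
  unfold direct1_staticLotteryNumber_alt
  have hinit : (PySem.List.pyRange 1 13 1).foldl (fun d i => d.insert i 0) PySem.Dict.empty
      = PySem.Dict.mk ((PySem.List.pyRange 1 13 1).map fun i => (i, (0 : Int))) := by decide
  simp only [hinit]
  rw [outer_fold dataList (fun _ => 0)]
  rfl

-- ===== VERDICT (by name: the statement is the Claim_ definition above) =====
theorem direct1_staticLotteryNumber_spec : Claim_equal_direct1_staticLotteryNumber := by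
  intro dataList _
  unfold Spec_direct1_staticLotteryNumber
  rw [A_characterization, B_characterization]
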